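-- pv_equiv track=rewrite | github.com/sunnyzhengai/Math_Agent_Website | agentic/agents/rules/factoring.py | factor_a1
-- ===== SOURCE A (Python) =====
-- from typing import Optional, Tuple
--
-- def factor_a1(b: int, c: int) -> Optional[Tuple[int, int]]:
--     """
--     Find (p, q) such that p*q = c and p+q = b.
--
--     Returns:
--         (p, q) tuple if found, else None
--     """
--     if c == 0:
--         # Special case: x^2 + bx = 0 => x(x+b) = 0 => roots 0, -b
--         return (0, b)
--
--     # Enumerate factor pairs of c
--     for p in range(-abs(c), abs(c) + 1):
--         if p == 0:
--             continue
--         if c % p != 0: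
--             continue
--         q = c // p
--         if p + q == b:
--             return (p, q)
--
--     return None
-- ===== SOURCE B (Python) =====
-- def factor_a1(b, c):
--     """
--     Find (p, q) such that p*q = c and p+q = b.
--
--     Returns:
--         (p, q) tuple if found, else None
--     """
--     if c == 0:
--         # Special case: x^2 + bx = 0 => x(x+b) = 0 => roots 0, -b
--         return (0, b)
--
--     # Enumerate divisors d of |c| up to sqrt(|c|); try p = d and p = -d.
--     a = abs(c)
--     d = 1
--     while d * d <= a:
--         if a % d == 0:
--             q = c // d
--             if d + q == b:
--                 return (d, q) if d <= q else (q, d)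
--             q = c // (-d)
--             if -d + q == b:
--                 return (-d, q) if -d <= q else (q, -d)
--         d += 1
--     return None
-- ===== Notes on version B (the rewrite author's own statement) =====
-- stated objective: faster
-- what changed: Replaces A's linear scan of all integers in [-|c|,|c|] by enumerating divisors d of |c| only up to sqrt(|c|) (testing p=d and p=-d), returning the root pair in ascending order.
import Mathlib
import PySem

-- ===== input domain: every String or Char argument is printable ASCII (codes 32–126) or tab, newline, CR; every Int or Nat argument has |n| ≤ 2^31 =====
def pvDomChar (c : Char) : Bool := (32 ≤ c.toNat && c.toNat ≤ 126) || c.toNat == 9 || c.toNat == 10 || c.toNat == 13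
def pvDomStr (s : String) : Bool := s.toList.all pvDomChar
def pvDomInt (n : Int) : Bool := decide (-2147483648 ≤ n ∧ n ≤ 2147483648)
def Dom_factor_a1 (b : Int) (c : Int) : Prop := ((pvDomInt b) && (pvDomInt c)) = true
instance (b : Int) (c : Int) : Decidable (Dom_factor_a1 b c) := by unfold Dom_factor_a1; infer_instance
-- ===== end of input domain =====

-- B replaces A's scan of every integer in [-|c|, |c|] by a divisor enumeration up to sqrt(|c|).

-- ===== PORT A =====
-- the 'for p in range(-abs(c), abs(c)+1)' loop with its early return
def factorA_loop (b : Int) (c : Int) : List Int → Option (Int × Int)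
  | [] => none
  | p :: rest =>
    if p = 0 then factorA_loop b c rest
    else if PySem.Int.mod c p ≠ 0 then factorA_loop b c rest
    else
      let q := PySem.Int.floordiv c p
      if p + q = b then some (p, q) else factorA_loop b c rest

def factor_a1 (b : Int) (c : Int) : Option (Int × Int) :=
  if c = 0 then some (0, b)
  else factorA_loop b c (PySem.List.pyRange (-|c|) (|c| + 1) 1)

-- ===== PORT B =====
-- the 'while d * d <= a' loop of Source B; a = abs(c), d counts up from 1
def factorB_loop (b : Int) (c : Int) (a : Nat) (d : Nat) : Option (Int × Int) :=
  if h : d * d ≤ a then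
    if a % d = 0 then
      -- q = c // d ; q' = c // (-d) (the two sign choices for p)
      if (d : Int) + PySem.Int.floordiv c (d : Int) = b then
        (if (d : Int) ≤ PySem.Int.floordiv c (d : Int) then
          some ((d : Int), PySem.Int.floordiv c (d : Int))
        else some (PySem.Int.floordiv c (d : Int), (d : Int)))
      else if -(d : Int) + PySem.Int.floordiv c (-(d : Int)) = b then
        (if -(d : Int) ≤ PySem.Int.floordiv c (-(d : Int)) then
          some (-(d : Int), PySem.Int.floordiv c (-(d : Int)))
        else some (PySem.Int.floordiv c (-(d : Int)), -(d : Int)))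
      else factorB_loop b c a (d + 1)
    else factorB_loop b c a (d + 1)
  else none
termination_by a + 1 - d
decreasing_by
  all_goals
    have hd : d ≤ a := by
      rcases Nat.eq_zero_or_pos d with h0 | h1
      · omega
      · calc d = d * 1 := (Nat.mul_one d).symm
          _ ≤ d * d := Nat.mul_le_mul_left d h1
          _ ≤ a := h
  all_goals omega

def factor_a1_alt (b : Int) (c : Int) : Option (Int × Int) :=
  if c = 0 then some (0, b)
  else factorB_loop b c c.natAbs 1

-- ===== PRECONDITION & SPEC =====
def Spec_factor_a1 (b : Int) (c : Int) (out : Option (Int × Int)) : Prop := out = factor_a1_alt b c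
instance (b : Int) (c : Int) (out : Option (Int × Int)) : Decidable (Spec_factor_a1 b c out) := by unfold Spec_factor_a1; infer_instance

-- ===== CLAIM (what is proved, stated in full; the proofs are below) =====
def Claim_equal_factor_a1 : Prop := ∀ (b : Int) (c : Int), Dom_factor_a1 b c → Spec_factor_a1 b c (factor_a1 b c)

-- ===== LEMMAS AND PROOFS =====

-- a valid answer: the ordered root pair of x^2 - b x + c
def Good (b c : Int) (v : Int × Int) : Prop :=
  v.1 * v.2 = c ∧ v.1 + v.2 = b ∧ v.1 ≤ v.2

theorem Good_unique {b c : Int} {v w : Int × Int} (hv : Good b c v) (hw : Good b c w) : v = w := by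
  obtain ⟨hv1, hv2, hv3⟩ := hv
  obtain ⟨hw1, hw2, hw3⟩ := hw
  have key : (v.1 - w.1) * (v.1 - w.2) = 0 := by
    linear_combination hw1 - hv1 + (hv2 - hw2) * v.1
  rcases mul_eq_zero.mp key with h | h
  · exact Prod.ext (by omega) (by omega)
  · exact Prod.ext (by omega) (by omega)

-- the predicate under which A's loop accepts p
def PA (b c x : Int) : Prop := x ≠ 0 ∧ PySem.Int.mod c x = 0 ∧ x + PySem.Int.floordiv c x = b

theorem fd_mul {c p : Int} (h : PySem.Int.mod c p = 0) : PySem.Int.floordiv c p * p = c := by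
  have h2 := PySem.Int.floordiv_mul_add_mod c p
  rw [h] at h2; simpa using h2

theorem floordiv_eq_other {c p q : Int} (hp : p ≠ 0) (hmod : PySem.Int.mod c p = 0)
    (hpq : q * p = c) : PySem.Int.floordiv c p = q :=
  mul_right_cancel₀ hp ((fd_mul hmod).trans hpq.symm)

theorem PA_of {b c x y : Int} (hc : c ≠ 0) (hxy : x * y = c) (hsum : x + y = b) : PA b c x := by
  have hx : x ≠ 0 := by rintro rfl; simp at hxy; exact hc hxy.symm
  have hmod : PySem.Int.mod c x = 0 :=
    (PySem.Int.mod_eq_zero_iff_dvd c x).mpr ⟨y, hxy.symm⟩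
  have hfd : PySem.Int.floordiv c x = y :=
    floordiv_eq_other hx hmod (by rw [mul_comm]; exact hxy)
  exact ⟨hx, hmod, by rw [hfd]; exact hsum⟩

theorem mem_range_of_dvd {c x : Int} (hc : c ≠ 0) (hx : x ∣ c) :
    x ∈ PySem.List.pyRange (-|c|) (|c| + 1) 1 := by
  rw [PySem.List.mem_pyRange_one]
  have h1 : x.natAbs ≤ c.natAbs :=
    Nat.le_of_dvd (Int.natAbs_pos.mpr hc) (Int.natAbs_dvd_natAbs.mpr hx)
  rw [Int.abs_eq_natAbs]
  omega

theorem loopA_some {b c : Int} {v : Int × Int} :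
    ∀ l, factorA_loop b c l = some v → v.2 = PySem.Int.floordiv c v.1 ∧ PA b c v.1 := by
  intro l
  induction l with
  | nil => intro h; simp [factorA_loop] at h
  | cons p rest ih =>
    intro h
    simp only [factorA_loop] at h
    split_ifs at h with h0 h1 h2
    · exact ih h
    · exact ih h
    · cases h
      exact ⟨rfl, h0, by simpa using h1, h2⟩
    · exact ih h

theorem loopA_first {b c : Int} {v : Int × Int} :
    ∀ l, List.Pairwise (· < ·) l → factorA_loop b c l = some v →
      ∀ x ∈ l, PA b c x → v.1 ≤ x := by
  intro l
  induction l with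
  | nil => intro _ h; simp [factorA_loop] at h
  | cons p rest ih =>
    intro hpw h x hx hPAx
    have hpw' := List.pairwise_cons.mp hpw
    simp only [factorA_loop] at h
    by_cases hPAp : PA b c p
    · obtain ⟨p0, pm, ps⟩ := hPAp
      rw [if_neg p0, if_neg (by simpa using pm), if_pos ps] at h
      cases h
      rcases List.mem_cons.mp hx with rfl | hx'
      · exact le_refl _
      · exact le_of_lt (hpw'.1 x hx')
    · have h' : factorA_loop b c rest = some v := by
        split_ifs at h with h0 h1 h2
        · exact h
        · exact h
        · exact absurd ⟨h0, by simpa using h1, h2⟩ hPAp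
        · exact h
      rcases List.mem_cons.mp hx with rfl | hx'
      · exact absurd hPAx hPAp
      · exact ih hpw'.2 h' x hx' hPAx

theorem loopA_exists {b c : Int} :
    ∀ l x, x ∈ l → PA b c x → factorA_loop b c l ≠ none := by
  intro l
  induction l with
  | nil => intro x hx; simp at hx
  | cons p rest ih =>
    intro x hx hPAx
    simp only [factorA_loop]
    split_ifs with h0 h1 h2
    · rcases List.mem_cons.mp hx with rfl | hx'
      · exact absurd h0 hPAx.1
      · exact ih x hx' hPAx
    · rcases List.mem_cons.mp hx with rfl | hx'
      · exact absurd hPAx.2.1 (by simpa using h1)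
      · exact ih x hx' hPAx
    · simp
    · rcases List.mem_cons.mp hx with rfl | hx'
      · exact absurd hPAx.2.2 h2
      · exact ih x hx' hPAx

theorem A_good {b c : Int} {v : Int × Int} (hc : c ≠ 0)
    (h : factorA_loop b c (PySem.List.pyRange (-|c|) (|c| + 1) 1) = some v) :
    Good b c v := by
  obtain ⟨h2, hx, hmod, hsum⟩ := loopA_some _ h
  have hprod : v.1 * v.2 = c := by rw [h2, mul_comm]; exact fd_mul hmod
  have hsum' : v.1 + v.2 = b := by rw [h2]; exact hsum
  refine ⟨hprod, hsum', ?_⟩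
  have hPA2 : PA b c v.2 := PA_of hc (by rw [mul_comm]; exact hprod) (by omega)
  have hmem : v.2 ∈ PySem.List.pyRange (-|c|) (|c| + 1) 1 :=
    mem_range_of_dvd hc ⟨v.1, by rw [mul_comm]; exact hprod.symm⟩
  exact loopA_first _ (PySem.List.pairwise_lt_pyRange_one _ _) h v.2 hmem hPA2

theorem A_ne_none {b c : Int} {v : Int × Int} (hc : c ≠ 0) (hG : Good b c v) :
    factorA_loop b c (PySem.List.pyRange (-|c|) (|c| + 1) 1) ≠ none :=
  loopA_exists _ v.1 (mem_range_of_dvd hc ⟨v.2, hG.1.symm⟩) (PA_of hc hG.1 hG.2.1)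

-- ==== B side ====

theorem dvd_of_modAbs {c : Int} {d : Nat} (h : c.natAbs % d = 0) : (d : Int) ∣ c :=
  Int.dvd_natAbs.mp (Int.natCast_dvd_natCast.mpr (Nat.dvd_of_mod_eq_zero h))

theorem loopB_some {b c : Int} {v : Int × Int} :
    ∀ n d, c.natAbs + 1 - d ≤ n → factorB_loop b c c.natAbs d = some v → Good b c v := by
  intro n
  induction n with
  | zero =>
    intro d hd h
    unfold factorB_loop at h
    rw [dif_neg (by
      intro h1
      have : d ≤ d * d := Nat.le_mul_of_pos_left d (by omega)
      omega)] at h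
    exact absurd h (by simp)
  | succ n ih =>
    intro d hd h
    unfold factorB_loop at h
    split_ifs at h with h1 h2 h3 h4 h5 h6
    · -- returns (d, q)
      cases h
      have hq := fd_mul ((PySem.Int.mod_eq_zero_iff_dvd c (d : Int)).mpr (dvd_of_modAbs h2))
      exact ⟨by rw [mul_comm]; exact hq, h3, h4⟩
    · -- returns (q, d)
      cases h
      have hq := fd_mul ((PySem.Int.mod_eq_zero_iff_dvd c (d : Int)).mpr (dvd_of_modAbs h2))
      exact ⟨hq, by linarith, by linarith⟩
    · -- returns (-d, q')
      cases h
      have hq := fd_mul ((PySem.Int.mod_eq_zero_iff_dvd c (-(d : Int))).mpr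
        ((Int.neg_dvd).mpr (dvd_of_modAbs h2)))
      exact ⟨by rw [mul_comm]; exact hq, h5, h6⟩
    · -- returns (q', -d)
      cases h
      have hq := fd_mul ((PySem.Int.mod_eq_zero_iff_dvd c (-(d : Int))).mpr
        ((Int.neg_dvd).mpr (dvd_of_modAbs h2)))
      exact ⟨hq, by linarith, by linarith⟩
    · exact ih (d + 1) (by omega) h
    · exact ih (d + 1) (by omega) h

theorem loopB_hits {b c r s : Int} (hc : c ≠ 0) (hr : r * s = c) (hb : r + s = b)
    (hm : r.natAbs ≤ s.natAbs) :
    factorB_loop b c c.natAbs r.natAbs ≠ none := by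
  have hr0 : r ≠ 0 := by rintro rfl; simp at hr; exact hc hr.symm
  have hdvd : r ∣ c := ⟨s, hr.symm⟩
  have hmm : r.natAbs * r.natAbs ≤ c.natAbs := by
    calc r.natAbs * r.natAbs ≤ r.natAbs * s.natAbs := Nat.mul_le_mul_left _ hm
      _ = c.natAbs := by rw [← Int.natAbs_mul, hr]
  have hmodN : c.natAbs % r.natAbs = 0 :=
    Nat.mod_eq_zero_of_dvd (Int.natAbs_dvd_natAbs.mpr hdvd)
  have hfdr : PySem.Int.floordiv c r = s :=
    floordiv_eq_other hr0 ((PySem.Int.mod_eq_zero_iff_dvd c r).mpr hdvd)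
      (by rw [mul_comm]; exact hr)
  unfold factorB_loop
  rw [dif_pos hmm, if_pos hmodN]
  split_ifs with h3 h4 h5 h6 <;> try simp
  -- both sum checks failed: impossible, since r = ±|r| makes one of them hb
  rcases Int.natAbs_eq r with he | he
  · exact absurd (by rw [← he, hfdr]; exact hb) h3
  · have he' : -((r.natAbs : Int)) = r := by omega
    exact absurd (by rw [he', hfdr]; exact hb) h5

theorem loopB_ne_none {b c : Int} {m : Nat} (hma : m * m ≤ c.natAbs)
    (hhit : factorB_loop b c c.natAbs m ≠ none) :
    ∀ n d, 1 ≤ d → d ≤ m → m - d ≤ n → factorB_loop b c c.natAbs d ≠ none := by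
  intro n
  induction n with
  | zero =>
    intro d h1 h2 h3
    have : d = m := by omega
    subst this; exact hhit
  | succ n ih =>
    intro d h1 h2 h3
    by_cases hdm : d = m
    · subst hdm; exact hhit
    · unfold factorB_loop
      rw [dif_pos (by calc d * d ≤ m * m := Nat.mul_le_mul h2 h2
            _ ≤ c.natAbs := hma)]
      split_ifs with h4 h5 h6 h7 h8
      · simp
      · simp
      · simp
      · simp
      · exact ih (d + 1) (by omega) (by omega) (by omega)
      · exact ih (d + 1) (by omega) (by omega) (by omega)

-- ===== VERDICT (by name: the statement is the Claim_ definition above) =====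
theorem factor_a1_spec : Claim_equal_factor_a1 := by
  intro b c _
  unfold Spec_factor_a1 factor_a1 factor_a1_alt
  by_cases hc : c = 0
  · simp [hc]
  · rw [if_neg hc, if_neg hc]
    cases hA : factorA_loop b c (PySem.List.pyRange (-|c|) (|c| + 1) 1) with
    | some v =>
      have hG := A_good hc hA
      have hv1 : v.1 ≠ 0 := by
        rintro h0; have hp := hG.1; rw [h0, zero_mul] at hp; exact hc hp.symm
      -- pick the root of smaller absolute value
      have hB : factorB_loop b c c.natAbs 1 ≠ none := by
        rcases Nat.le_total v.1.natAbs v.2.natAbs with hle | hle'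
        · exact loopB_ne_none
            (by calc v.1.natAbs * v.1.natAbs ≤ v.1.natAbs * v.2.natAbs := Nat.mul_le_mul_left _ hle
                  _ = c.natAbs := by rw [← Int.natAbs_mul, hG.1])
            (loopB_hits hc hG.1 hG.2.1 hle)
            v.1.natAbs 1 (by omega) (by omega) (by omega)
        · have hv2 : v.2 ≠ 0 := by
            rintro h0; have hp := hG.1; rw [h0, mul_zero] at hp; exact hc hp.symm
          exact loopB_ne_none
            (by calc v.2.natAbs * v.2.natAbs ≤ v.2.natAbs * v.1.natAbs := Nat.mul_le_mul_left _ hle'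
                  _ = c.natAbs := by rw [← Int.natAbs_mul, mul_comm, hG.1])
            (loopB_hits hc (by rw [mul_comm]; exact hG.1) (by rw [add_comm]; exact hG.2.1) hle')
            v.2.natAbs 1 (by omega) (by omega) (by omega)
      cases hB2 : factorB_loop b c c.natAbs 1 with
      | none => exact absurd hB2 hB
      | some w =>
        have hGw := loopB_some (c.natAbs + 1) 1 (by omega) hB2
        rw [Good_unique hG hGw]
    | none =>
      cases hB2 : factorB_loop b c c.natAbs 1 with
      | none => rfl
      | some w =>
        have hGw := loopB_some (c.natAbs + 1) 1 (by omega) hB2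
        exact absurd hA (A_ne_none hc hGw)
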